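-- pv_equiv track=rewrite | github.com/david-thybert/dt-positive_selection | tools/Analyse_site_gaps.py | get_distance_gap_site
-- ===== SOURCE A (Python) =====
-- def get_distance_gap_site(sites:list, gap_profile:list)->dict:
--     """
--
--     """
--     result = {}
--     for site in sites:
--         pos_id = site[0]
--         pos = site[1]
--         min_dist = 10000000000
--         for gap in gap_profile:
--             if pos <= gap[1] and pos >=gap[0]:
--                 min_dist = 0
--             else:
--                 ds = abs(pos - gap[0])
--                 de = abs(pos - gap[1])
--                 mind = de if de < ds else ds
--                 min_dist = mind if mind < min_dist else min_dist
--         result[pos_id] = min_dist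
--     return result
-- ===== SOURCE B (Python) =====
-- def _bisect_left(a, x):
--     lo, hi = 0, len(a)
--     while lo < hi:
--         mid = (lo + hi) // 2
--         if a[mid] < x:
--             lo = mid + 1
--         else:
--             hi = mid
--     return lo
--
--
-- def _bisect_right(a, x):
--     lo, hi = 0, len(a)
--     while lo < hi:
--         mid = (lo + hi) // 2
--         if x < a[mid]:
--             hi = mid
--         else:
--             lo = mid + 1
--     return lo
--
--
-- def get_distance_gap_site(sites: list, gap_profile: list) -> dict:
--     # Sort once, binary-search each site: O((S+G) log G) instead of A's O(S*G).
--     starts = sorted(g[0] for g in gap_profile if g[0] <= g[1])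
--     ends = sorted(g[1] for g in gap_profile if g[0] <= g[1])
--     pts = sorted(b for g in gap_profile for b in (g[0], g[1]))
--     result = {}
--     for site in sites:
--         pos_id = site[0]
--         pos = site[1]
--         if _bisect_right(starts, pos) > _bisect_left(ends, pos):
--             # pos lies inside some gap interval
--             result[pos_id] = 0
--         else:
--             d = 10000000000
--             i = _bisect_left(pts, pos)
--             if i > 0:
--                 d = pos - pts[i - 1]
--             if i < len(pts) and pts[i] - pos < d:
--                 d = pts[i] - pos
--             result[pos_id] = d
--     return result
-- ===== Notes on version B (the rewrite author's own statement) =====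
-- stated objective: faster
-- what changed: Instead of scanning all gap intervals for every site, B sorts the gap boundaries (and valid starts/ends) once and answers each site by binary search: containment via a start/end count comparison, nearest distance via the two neighbours of the insertion point.
-- outside the precondition, e.g. on get_distance_gap_site([], [[]]): A returns {}, B raises IndexError
import Mathlib
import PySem

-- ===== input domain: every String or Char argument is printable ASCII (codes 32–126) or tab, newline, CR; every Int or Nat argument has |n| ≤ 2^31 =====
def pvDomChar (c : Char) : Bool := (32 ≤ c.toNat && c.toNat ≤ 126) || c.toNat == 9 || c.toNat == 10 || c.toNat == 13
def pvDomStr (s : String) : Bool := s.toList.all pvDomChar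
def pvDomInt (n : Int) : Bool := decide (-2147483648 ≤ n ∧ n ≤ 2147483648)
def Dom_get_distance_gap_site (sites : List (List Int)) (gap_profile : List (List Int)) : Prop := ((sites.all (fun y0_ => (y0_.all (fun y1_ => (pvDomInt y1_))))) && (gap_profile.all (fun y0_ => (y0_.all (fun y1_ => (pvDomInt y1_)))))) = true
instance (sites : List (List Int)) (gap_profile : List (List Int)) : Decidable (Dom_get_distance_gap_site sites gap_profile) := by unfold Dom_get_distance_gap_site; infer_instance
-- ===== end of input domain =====

-- B sorts the gap boundaries once and answers each site by binary search (containment by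
-- comparing start/end counts, nearest distance from the insertion point's two neighbours),
-- replacing A's per-site scan of all gaps: O((S+G) log G) instead of O(S*G).

-- ===== PORT A =====
-- site[0]/site[1]/gap[0]/gap[1] are ported as getD _ 0; exact under Pre_ (every list has length ≥ 2).
def get_distance_gap_site (sites : List (List Int)) (gap_profile : List (List Int)) : List (Int × Int) :=
  (sites.foldl (fun (result : PySem.Dict Int Int) site =>
      let pos_id := site.getD 0 0
      let pos := site.getD 1 0
      let min_dist := gap_profile.foldl (fun min_dist gap =>
        if pos ≤ gap.getD 1 0 ∧ gap.getD 0 0 ≤ pos then (0 : Int)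
        else
          let ds := |pos - gap.getD 0 0|
          let de := |pos - gap.getD 1 0|
          let mind := if de < ds then de else ds
          if mind < min_dist then mind else min_dist) (10000000000 : Int)
      result.insert pos_id min_dist) PySem.Dict.empty).items

-- ===== PORT B =====
-- Source B's hand-written _bisect_left/_bisect_right are CPython's bisect_left/bisect_right
-- (the identical lo/hi midpoint loop), ported as PySem.List.bisectLeft / bisectRight.
def get_distance_gap_site_alt (sites : List (List Int)) (gap_profile : List (List Int)) : List (Int × Int) :=
  let starts := PySem.List.sorted ((gap_profile.filter (fun g => decide (g.getD 0 0 ≤ g.getD 1 0))).map (fun g => g.getD 0 0)) (fun x => x) false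
  let ends := PySem.List.sorted ((gap_profile.filter (fun g => decide (g.getD 0 0 ≤ g.getD 1 0))).map (fun g => g.getD 1 0)) (fun x => x) false
  let pts := PySem.List.sorted (gap_profile.flatMap (fun g => [g.getD 0 0, g.getD 1 0])) (fun x => x) false
  (sites.foldl (fun (result : PySem.Dict Int Int) site =>
      let pos_id := site.getD 0 0
      let pos := site.getD 1 0
      if PySem.List.bisectLeft ends pos < PySem.List.bisectRight starts pos then
        result.insert pos_id 0
      else
        let i := PySem.List.bisectLeft pts pos
        let d1 : Int := if 0 < i then pos - pts.getD (i - 1) 0 else 10000000000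
        let d2 : Int := if i < pts.length ∧ pts.getD i 0 - pos < d1 then pts.getD i 0 - pos else d1
        result.insert pos_id d2) PySem.Dict.empty).items

-- ===== PRECONDITION & SPEC =====
-- Pre_ excludes inputs with a site or gap list of fewer than 2 elements: Python A raises IndexError on them wherever it reads them, and when sites is empty A never reads the gaps (returning {}) while B's preprocessing does and raises.
def Pre_get_distance_gap_site (sites : List (List Int)) (gap_profile : List (List Int)) : Prop :=
  (∀ s ∈ sites, 2 ≤ s.length) ∧ (∀ g ∈ gap_profile, 2 ≤ g.length)
instance (sites : List (List Int)) (gap_profile : List (List Int)) : Decidable (Pre_get_distance_gap_site sites gap_profile) := by unfold Pre_get_distance_gap_site; infer_instance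
def pvWitness_get_distance_gap_site : List (List Int) × List (List Int) := ([[1, 5], [2, 9]], [[7, 8], [20, 30]])
def Spec_get_distance_gap_site (sites : List (List Int)) (gap_profile : List (List Int)) (out : List (Int × Int)) : Prop := out = get_distance_gap_site_alt sites gap_profile
instance (sites : List (List Int)) (gap_profile : List (List Int)) (out : List (Int × Int)) : Decidable (Spec_get_distance_gap_site sites gap_profile out) := by unfold Spec_get_distance_gap_site; infer_instance

-- ===== CLAIM (what is proved, stated in full; the proofs are below) =====
def Claim_equal_get_distance_gap_site : Prop := ∀ (sites : List (List Int)) (gap_profile : List (List Int)), Dom_get_distance_gap_site sites gap_profile → Pre_get_distance_gap_site sites gap_profile → Spec_get_distance_gap_site sites gap_profile (get_distance_gap_site sites gap_profile)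

-- ===== LEMMAS AND PROOFS =====

-- bound predicate used throughout (the Dom_ bound)
def pvBnd (v : Int) : Prop := -2147483648 ≤ v ∧ v ≤ 2147483648

-- the per-gap contribution A's inner loop takes the minimum of
def pvDist (pos : Int) (g : List Int) : Int :=
  if pos ≤ g.getD 1 0 ∧ g.getD 0 0 ≤ pos then 0
  else min |pos - g.getD 0 0| |pos - g.getD 1 0|

lemma pvDist_nonneg (pos : Int) (g : List Int) : 0 ≤ pvDist pos g := by
  unfold pvDist
  split_ifs with h
  · exact le_refl 0
  · exact le_min (abs_nonneg _) (abs_nonneg _)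

-- A's inner loop is the running minimum of pvDist
lemma A_inner_eq (pos : Int) (gaps : List (List Int)) :
    ∀ acc : Int, 0 ≤ acc →
    gaps.foldl (fun min_dist gap =>
        if pos ≤ gap.getD 1 0 ∧ gap.getD 0 0 ≤ pos then (0 : Int)
        else
          let ds := |pos - gap.getD 0 0|
          let de := |pos - gap.getD 1 0|
          let mind := if de < ds then de else ds
          if mind < min_dist then mind else min_dist) acc
      = (gaps.map (pvDist pos)).foldl min acc := by
  induction gaps with
  | nil => intro acc _; rfl
  | cons g t ih =>
      intro acc hacc
      have hstep : (if pos ≤ g.getD 1 0 ∧ g.getD 0 0 ≤ pos then (0 : Int)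
          else
            let ds := |pos - g.getD 0 0|
            let de := |pos - g.getD 1 0|
            let mind := if de < ds then de else ds
            if mind < acc then mind else acc) = min acc (pvDist pos g) := by
        unfold pvDist
        have ha : 0 ≤ |pos - g.getD 0 0| := abs_nonneg _
        have hb : 0 ≤ |pos - g.getD 1 0| := abs_nonneg _
        simp only [min_def]
        split_ifs <;> omega
      simp only [List.foldl_cons, List.map_cons, hstep]
      exact ih _ (le_min hacc (pvDist_nonneg pos g))

-- running min over a list with a known minimizer
lemma foldl_min_of_min {l : List Int} {m b : Int} (hm : m ∈ l) (hmin : ∀ x ∈ l, m ≤ x) :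
    l.foldl min b = min b m := by
  have h1 := PySem.List.foldl_min_le l b
  have h2 := PySem.List.foldl_min_mem l b
  refine le_antisymm (le_min h1.1 (h1.2 m hm)) ?_
  rcases h2 with h | h
  · rw [h]; exact min_le_left _ _
  · exact le_trans (min_le_right _ _) (hmin _ h)

-- a prefix-characterized index is a countP
lemma countP_eq_of_prefix {l : List Int} {p : Int → Bool} {r : Nat} (hr : r ≤ l.length)
    (h1 : ∀ (j : Nat) (hj : j < l.length), j < r → p l[j])
    (h2 : ∀ (j : Nat) (hj : j < l.length), r ≤ j → ¬ p l[j]) :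
    l.countP p = r := by
  have hsplit : l = l.take r ++ l.drop r := (List.take_append_drop r l).symm
  rw [hsplit, List.countP_append]
  have htake : (l.take r).countP p = r := by
    have hlen : (l.take r).length = r := by
      simp [List.length_take, Nat.min_eq_left hr]
    have hall : ∀ a ∈ l.take r, p a = true := by
      intro a ha
      obtain ⟨j, hj, rfl⟩ := List.mem_iff_getElem.1 ha
      rw [List.getElem_take]
      have hj' : j < r := by omega
      exact h1 j (by omega) hj'
    rw [List.countP_eq_length.2 hall, hlen]
  have hdrop : (l.drop r).countP p = 0 := by
    refine List.countP_eq_zero.2 ?_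
    intro a ha
    obtain ⟨j, hj, rfl⟩ := List.mem_iff_getElem.1 ha
    rw [List.getElem_drop]
    exact h2 (r + j) (by simp at hj; omega) (by omega)
  omega

lemma bisectLeft_eq_countP (l : List Int) (x : Int)
    (hs : List.Pairwise (fun a b => a ≤ b) l) :
    PySem.List.bisectLeft l x = l.countP (fun a => decide (a < x)) := by
  obtain ⟨hle, hpre, hsuf⟩ := PySem.List.bisectLeft_spec l x hs
  exact (countP_eq_of_prefix hle
    (fun j hj hlt => by simpa using hpre j hj hlt)
    (fun j hj hge => by simpa using not_lt.2 (hsuf j hj hge))).symm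

lemma bisectRight_eq_countP (l : List Int) (x : Int)
    (hs : List.Pairwise (fun a b => a ≤ b) l) :
    PySem.List.bisectRight l x = l.countP (fun a => decide (a ≤ x)) := by
  obtain ⟨hle, hpre, hsuf⟩ := PySem.List.bisectRight_spec l x hs
  exact (countP_eq_of_prefix hle
    (fun j hj hlt => by simpa using hpre j hj hlt)
    (fun j hj hge => by simpa using not_le.2 (hsuf j hj hge))).symm

-- counting a condition and a consequence of it
lemma countP_split (l : List (List Int)) (p q : List Int → Bool)
    (himp : ∀ x ∈ l, q x = true → p x = true) :
    l.countP p = l.countP q + l.countP (fun x => p x && !q x) := by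
  induction l with
  | nil => rfl
  | cons a t ih =>
      have ht := ih (fun x hx => himp x (List.mem_cons_of_mem a hx))
      have ha := himp a List.mem_cons_self
      simp only [List.countP_cons]
      cases hpa : p a <;> cases hqa : q a <;> simp_all <;> omega

-- containment test of B ↔ some gap contains pos (A's inner-loop condition)
lemma contained_iff (gaps : List (List Int)) (pos : Int) :
    (PySem.List.bisectLeft
        (PySem.List.sorted ((gaps.filter (fun g => decide (g.getD 0 0 ≤ g.getD 1 0))).map (fun g => g.getD 1 0)) (fun x => x) false) pos
      < PySem.List.bisectRight
        (PySem.List.sorted ((gaps.filter (fun g => decide (g.getD 0 0 ≤ g.getD 1 0))).map (fun g => g.getD 0 0)) (fun x => x) false) pos)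
    ↔ ∃ g ∈ gaps, pos ≤ g.getD 1 0 ∧ g.getD 0 0 ≤ pos := by
  set valid := gaps.filter (fun g => decide (g.getD 0 0 ≤ g.getD 1 0)) with hvalid
  have hR : PySem.List.bisectRight
      (PySem.List.sorted (valid.map (fun g => g.getD 0 0)) (fun x => x) false) pos
      = valid.countP (fun g => decide (g.getD 0 0 ≤ pos)) := by
    rw [bisectRight_eq_countP _ _ (PySem.List.sorted_pairwise _ _),
        (PySem.List.sorted_perm _ _ _).countP_eq, List.countP_map]
    rfl
  have hL : PySem.List.bisectLeft
      (PySem.List.sorted (valid.map (fun g => g.getD 1 0)) (fun x => x) false) pos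
      = valid.countP (fun g => decide (g.getD 1 0 < pos)) := by
    rw [bisectLeft_eq_countP _ _ (PySem.List.sorted_pairwise _ _),
        (PySem.List.sorted_perm _ _ _).countP_eq, List.countP_map]
    rfl
  have hsplit := countP_split valid (fun g => decide (g.getD 0 0 ≤ pos))
      (fun g => decide (g.getD 1 0 < pos)) (by
    intro g hg hq
    have hv : g.getD 0 0 ≤ g.getD 1 0 := of_decide_eq_true (List.mem_filter.1 hg).2
    simp only [decide_eq_true_eq] at hq ⊢
    omega)
  beta_reduce at hsplit
  rw [hL, hR]
  constructor
  · intro hlt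
    have hpos : 0 < valid.countP (fun g => decide (g.getD 0 0 ≤ pos) && !decide (g.getD 1 0 < pos)) := by omega
    obtain ⟨g, hg, hp⟩ := List.countP_pos_iff.1 hpos
    refine ⟨g, (List.mem_filter.1 hg).1, ?_⟩
    simp only [Bool.and_eq_true, Bool.not_eq_true', decide_eq_true_eq, decide_eq_false_iff_not] at hp
    omega
  · rintro ⟨g, hg, h1, h2⟩
    have hgv : g ∈ valid := List.mem_filter.2 ⟨hg, decide_eq_true (by omega)⟩
    have hpos : 0 < valid.countP (fun g => decide (g.getD 0 0 ≤ pos) && !decide (g.getD 1 0 < pos)) :=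
      List.countP_pos_iff.2 ⟨g, hgv, by
        simp only [Bool.and_eq_true, Bool.not_eq_true', decide_eq_true_eq, decide_eq_false_iff_not]
        omega⟩
    omega

-- nearest boundary distance via the insertion point, on a sorted list with Dom-bounded entries
lemma nearest_eq (xs : List Int) (pos : Int)
    (hb : ∀ b ∈ xs, pvBnd b) (hpos : pvBnd pos) :
    (let pts := PySem.List.sorted xs (fun x => x) false
     let i := PySem.List.bisectLeft pts pos
     let d1 : Int := if 0 < i then pos - pts.getD (i - 1) 0 else 10000000000
     if i < pts.length ∧ pts.getD i 0 - pos < d1 then pts.getD i 0 - pos else d1)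
    = (xs.map (fun b => |pos - b|)).foldl min 10000000000 := by
  simp only []
  set pts := PySem.List.sorted xs (fun x => x) false with hpts
  set i := PySem.List.bisectLeft pts pos with hi
  have hpair : List.Pairwise (fun a b : Int => a ≤ b) pts := PySem.List.sorted_pairwise xs (fun x => x)
  obtain ⟨hle, hpre, hsuf⟩ := PySem.List.bisectLeft_spec pts pos hpair
  have hbp : ∀ b ∈ pts, pvBnd b := fun b hbm => hb b ((PySem.List.sorted_perm xs _ false).subset hbm)
  have hmono : ∀ (p q : Nat) (hpq : p ≤ q) (hq : q < pts.length), pts[p] ≤ pts[q] := by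
    intro p q hpq hq
    exact PySem.List.sorted_id_getElem_mono xs hpq hq
  -- replace the fold over xs by the fold over the sorted pts, split at the insertion point
  have hperm : ((pts.map (fun b => |pos - b|)).Perm (xs.map (fun b => |pos - b|))) :=
    (PySem.List.sorted_perm xs _ false).map _
  rw [← hperm.foldl_eq (rcomm := ⟨fun a b c => min_right_comm a b c⟩) 10000000000]
  have hsplit : pts.map (fun b => |pos - b|)
      = (pts.take i).map (fun b => |pos - b|) ++ (pts.drop i).map (fun b => |pos - b|) := by
    rw [← List.map_append, List.take_append_drop]
  rw [hsplit, List.foldl_append]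
  -- stage 1: the fold over the prefix (elements < pos) is d1
  have h1 : ((pts.take i).map (fun b => |pos - b|)).foldl min 10000000000
      = (if 0 < i then pos - pts.getD (i - 1) 0 else (10000000000 : Int)) := by
    by_cases hi0 : 0 < i
    · have him1 : i - 1 < pts.length := by omega
      have hm_lt : pts[i - 1] < pos := hpre (i - 1) him1 (by omega)
      have hmem : |pos - pts[i - 1]| ∈ (pts.take i).map (fun b => |pos - b|) := by
        refine List.mem_map.2 ⟨pts[i - 1], ?_, rfl⟩
        have hlt : i - 1 < (pts.take i).length := by
          simp [List.length_take]; omega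
        have : (pts.take i)[i - 1] = pts[i - 1] := List.getElem_take
        exact this ▸ List.getElem_mem hlt
      have hmin : ∀ x ∈ (pts.take i).map (fun b => |pos - b|), |pos - pts[i - 1]| ≤ x := by
        intro x hx
        obtain ⟨b, hbm, rfl⟩ := List.mem_map.1 hx
        obtain ⟨j, hj, rfl⟩ := List.mem_iff_getElem.1 hbm
        rw [List.getElem_take]
        have hj' : j < i := by simp [List.length_take] at hj; omega
        have hjlen : j < pts.length := by omega
        have hble : pts[j] ≤ pts[i - 1] := by
          rcases Nat.lt_or_ge j (i - 1) with h | h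
          · exact hmono j (i - 1) (by omega) him1
          · have : j = i - 1 := by omega
            subst this; exact le_refl _
        have hjlt : pts[j] < pos := hpre j hjlen hj'
        rw [abs_of_pos (by omega), abs_of_pos (by omega)]
        omega
      rw [foldl_min_of_min hmem hmin, if_pos hi0, List.getD_eq_getElem _ _ him1]
      have hbnd := hbp pts[i - 1] (List.getElem_mem him1)
      rw [abs_of_pos (by omega)]
      have : pos - pts[i - 1] ≤ 10000000000 := by
        rcases hbnd with ⟨hb1, hb2⟩; rcases hpos with ⟨hp1, hp2⟩; omega
      exact min_eq_right this
    · have : i = 0 := by omega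
      rw [this]
      simp
  rw [h1]
  -- stage 2: the fold over the suffix (elements ≥ pos) is the final if
  by_cases hi2 : i < pts.length
  · have hm_ge : pos ≤ pts[i] := hsuf i hi2 (le_refl i)
    have hmem : |pos - pts[i]| ∈ (pts.drop i).map (fun b => |pos - b|) := by
      refine List.mem_map.2 ⟨pts[i], ?_, rfl⟩
      have hlt : 0 < (pts.drop i).length := by simp [List.length_drop]; omega
      have : (pts.drop i)[0] = pts[i] := by simp [List.getElem_drop]
      exact this ▸ List.getElem_mem hlt
    have hmin : ∀ x ∈ (pts.drop i).map (fun b => |pos - b|), |pos - pts[i]| ≤ x := by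
      intro x hx
      obtain ⟨b, hbm, rfl⟩ := List.mem_map.1 hx
      obtain ⟨j, hj, rfl⟩ := List.mem_iff_getElem.1 hbm
      rw [List.getElem_drop]
      have hjlen : i + j < pts.length := by simp [List.length_drop] at hj; omega
      have hble : pts[i] ≤ pts[i + j] := hmono i (i + j) (by omega) hjlen
      rw [abs_of_nonpos (by omega), abs_of_nonpos (by omega)]
      omega
    rw [foldl_min_of_min hmem hmin]
    rw [abs_of_nonpos (by omega), List.getD_eq_getElem _ _ hi2]
    have hiff : (i < pts.length ∧ pts[i] - pos <
        (if 0 < i then pos - pts.getD (i - 1) 0 else (10000000000 : Int))) ↔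
        (pts[i] - pos < (if 0 < i then pos - pts.getD (i - 1) 0 else (10000000000 : Int))) := by
      constructor
      · exact fun h => h.2
      · exact fun h => ⟨hi2, h⟩
    rw [if_congr hiff rfl rfl, min_def]
    split_ifs <;> omega
  · have hdrop : pts.drop i = [] := List.drop_eq_nil_of_le (by omega)
    rw [hdrop]
    simp only [List.map_nil, List.foldl_nil]
    rw [if_neg (by omega)]

lemma pvBnd_getD (s : List Int) (h : ∀ v ∈ s, pvBnd v) (n : Nat) : pvBnd (s.getD n 0) := by
  rw [List.getD_eq_getElem?_getD]
  rcases hx : s[n]? with _ | v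
  · constructor <;> norm_num [pvBnd]
  · exact h v (List.mem_of_getElem? hx)

-- with no containing gap, the minimum of the per-gap contributions is the minimum over all boundaries
lemma pair_flat (pos : Int) (gaps : List (List Int))
    (h : ∀ g ∈ gaps, ¬(pos ≤ g.getD 1 0 ∧ g.getD 0 0 ≤ pos)) :
    ∀ acc : Int, (gaps.map (pvDist pos)).foldl min acc
      = ((gaps.flatMap (fun g => [g.getD 0 0, g.getD 1 0])).map (fun b => |pos - b|)).foldl min acc := by
  induction gaps with
  | nil => intro acc; rfl
  | cons g t ih =>
      intro acc
      have hg := h g List.mem_cons_self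
      have hd : pvDist pos g = min |pos - g.getD 0 0| |pos - g.getD 1 0| := by
        unfold pvDist; rw [if_neg hg]
      simp only [List.map_cons, List.flatMap_cons, List.cons_append, List.nil_append,
        List.foldl_cons, hd]
      rw [← min_assoc]
      exact ih (fun g' hg' => h g' (List.mem_cons_of_mem g hg')) _

-- per-site value: A's inner loop equals B's binary-search answer
lemma site_value (gaps : List (List Int)) (pos : Int)
    (hg : ∀ g ∈ gaps, ∀ v ∈ g, pvBnd v) (hpos : pvBnd pos) :
    gaps.foldl (fun min_dist gap =>
        if pos ≤ gap.getD 1 0 ∧ gap.getD 0 0 ≤ pos then (0 : Int)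
        else
          let ds := |pos - gap.getD 0 0|
          let de := |pos - gap.getD 1 0|
          let mind := if de < ds then de else ds
          if mind < min_dist then mind else min_dist) 10000000000
    = (if PySem.List.bisectLeft (PySem.List.sorted ((gaps.filter (fun g => decide (g.getD 0 0 ≤ g.getD 1 0))).map (fun g => g.getD 1 0)) (fun x => x) false) pos
          < PySem.List.bisectRight (PySem.List.sorted ((gaps.filter (fun g => decide (g.getD 0 0 ≤ g.getD 1 0))).map (fun g => g.getD 0 0)) (fun x => x) false) pos
       then 0
       else
         let pts := PySem.List.sorted (gaps.flatMap (fun g => [g.getD 0 0, g.getD 1 0])) (fun x => x) false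
         let i := PySem.List.bisectLeft pts pos
         let d1 : Int := if 0 < i then pos - pts.getD (i - 1) 0 else 10000000000
         if i < pts.length ∧ pts.getD i 0 - pos < d1 then pts.getD i 0 - pos else d1) := by
  rw [A_inner_eq pos gaps 10000000000 (by norm_num)]
  by_cases hc : ∃ g ∈ gaps, pos ≤ g.getD 1 0 ∧ g.getD 0 0 ≤ pos
  · rw [if_pos ((contained_iff gaps pos).2 hc)]
    obtain ⟨g, hgm, hg1, hg0⟩ := hc
    have hm : (0 : Int) ∈ gaps.map (pvDist pos) :=
      List.mem_map.2 ⟨g, hgm, by unfold pvDist; rw [if_pos ⟨hg1, hg0⟩]⟩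
    have hmin : ∀ x ∈ gaps.map (pvDist pos), (0 : Int) ≤ x := by
      intro x hx
      obtain ⟨g', _, rfl⟩ := List.mem_map.1 hx
      exact pvDist_nonneg pos g'
    rw [foldl_min_of_min hm hmin]
    exact min_eq_right (by norm_num)
  · rw [if_neg (fun h => hc ((contained_iff gaps pos).1 h))]
    push Not at hc
    rw [pair_flat pos gaps (by intro g hgm hcont; exact absurd hcont.2 (not_le.2 (hc g hgm hcont.1))) 10000000000]
    have hbflat : ∀ b ∈ gaps.flatMap (fun g => [g.getD 0 0, g.getD 1 0]), pvBnd b := by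
      intro b hbm
      obtain ⟨g, hgm, hb2⟩ := List.mem_flatMap.1 hbm
      have hgb : ∀ v ∈ g, pvBnd v := hg g hgm
      have hb2' : b = g.getD 0 0 ∨ b = g.getD 1 0 := by simpa using hb2
      rcases hb2' with rfl | rfl
      · exact pvBnd_getD g hgb 0
      · exact pvBnd_getD g hgb 1
    exact (nearest_eq (gaps.flatMap fun g => [g.getD 0 0, g.getD 1 0]) pos hbflat hpos).symm

-- ===== VERDICT (by name: the statement is the Claim_ definition above) =====
theorem get_distance_gap_site_spec : Claim_equal_get_distance_gap_site := by
  intro sites gaps hdom _hpre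
  unfold Spec_get_distance_gap_site
  simp only [Dom_get_distance_gap_site, Bool.and_eq_true, List.all_eq_true, pvDomInt,
    decide_eq_true_eq] at hdom
  obtain ⟨hS, hG⟩ := hdom
  unfold get_distance_gap_site get_distance_gap_site_alt
  simp only []
  refine congrArg PySem.Dict.items ?_
  apply PySem.List.foldl_congr_mem
  intro acc site hsite
  have hpos : pvBnd (site.getD 1 0) :=
    pvBnd_getD site (fun v hv => ⟨(hS site hsite v hv).1, (hS site hsite v hv).2⟩) 1
  have hsv := site_value gaps (site.getD 1 0) (fun g hgm v hv => ⟨(hG g hgm v hv).1, (hG g hgm v hv).2⟩) hpos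
  simp only [] at hsv
  rw [hsv]
  exact apply_ite (fun v => acc.insert (site.getD 0 0) v) _ _ _
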